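-- pv_equiv track=rewrite | github.com/TheOneNyangweso/Data_Science-In-Python | Python projects/CAB203_GraphsProjectBundle/project_trial_2.py | gameSchedule
-- ===== SOURCE A (Python) =====
-- def gameSchedule(assignedReferees, gameGroups):
--     players = {player for game in assignedReferees for player in game}
--     ref_games = {player: [
--         game for game in assignedReferees if assignedReferees[game] == player] for player in players}
--     player_games = {player: [
--         game for game in assignedReferees if player in game] for player in players}
--
--     schedule = []
--     while gameGroups:
--         for timeslot in gameGroups:
--             if all(
--                 all(game not in ref_games[player] for game in timeslot) or
--                 all(game in schedule for game in player_games[player])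
--                 for player in players
--             ):
--                 schedule.extend(timeslot)
--                 gameGroups.remove(timeslot)
--                 break
--         else:
--             return None
--     return schedule
-- ===== SOURCE B (Python) =====
-- def gameSchedule(assignedReferees, gameGroups):
--     # Note: like the original, this mutates gameGroups (removes scheduled timeslots).
--     players = {p for game in assignedReferees for p in game}
--     player_games = {p: [g for g in assignedReferees if p in g] for p in players}
--     # Precompute each timeslot's fixed requirement set: the games that must
--     # already be scheduled before it may run.
--     pending = [(ts, {g for game in ts
--                        for r in (assignedReferees.get(game),) if r in players
--                        for g in player_games[r]})
--                for ts in gameGroups]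
--     schedule, done = [], set()
--     while pending:
--         for i, (ts, req) in enumerate(pending):
--             if req <= done:
--                 schedule += ts
--                 done.update(ts)
--                 del pending[i]
--                 gameGroups.remove(ts)
--                 break
--         else:
--             return None
--     return schedule
-- ===== Notes on version B (the rewrite author's own statement) =====
-- stated objective: alternative
-- what changed: B precomputes, once per timeslot, a fixed requirement set (the union over the slot's games of the referee's own games, looking each referee up directly in assignedReferees), so the greedy loop's test collapses to one subset check req <= done against a maintained scheduled set instead of A's scan over every player with the OR-filter over a precomputed ref_games table.
import Mathlib
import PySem

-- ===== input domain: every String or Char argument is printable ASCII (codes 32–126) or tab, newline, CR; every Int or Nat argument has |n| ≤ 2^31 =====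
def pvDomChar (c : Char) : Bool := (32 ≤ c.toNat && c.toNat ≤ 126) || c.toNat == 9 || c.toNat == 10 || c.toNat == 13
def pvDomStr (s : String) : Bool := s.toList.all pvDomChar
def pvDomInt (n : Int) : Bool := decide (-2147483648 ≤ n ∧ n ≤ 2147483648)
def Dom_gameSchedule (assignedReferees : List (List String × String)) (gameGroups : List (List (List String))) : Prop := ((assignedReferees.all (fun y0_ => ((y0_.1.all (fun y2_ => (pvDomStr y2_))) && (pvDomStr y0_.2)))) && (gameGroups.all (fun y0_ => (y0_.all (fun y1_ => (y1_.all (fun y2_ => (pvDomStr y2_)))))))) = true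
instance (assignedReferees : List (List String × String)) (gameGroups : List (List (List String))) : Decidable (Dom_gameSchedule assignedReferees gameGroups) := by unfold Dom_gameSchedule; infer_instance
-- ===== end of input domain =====

-- B precomputes, once per timeslot, a fixed requirement set (union of the slot's referees'
-- own games, via direct lookup in assignedReferees), reducing A's per-player OR-filter scan
-- to one subset check against a maintained scheduled set; both Pythons mutate gameGroups
-- identically (remove), and the equivalence proved is about the return value.

-- ===== PORT A =====

-- `for timeslot in gameGroups: if cond: remove+break / else: None` — returns the first timeslot
-- satisfying cond together with gameGroups with that (first equal) occurrence removed.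
def pvPickSlot (cond : List (List String) → Bool) :
    List (List (List String)) → Option (List (List String) × List (List (List String)))
  | [] => none
  | ts :: rest =>
    if cond ts then some (ts, rest)
    else match pvPickSlot cond rest with
         | some (t, rest') => some (t, ts :: rest')
         | none => none

-- A's schedulability test: all players p: (no game of the timeslot in ref_games[p]) or (all of player_games[p] scheduled)
def pvCondA (players : PySem.Set String) (refGames playerGames : PySem.Dict String (List (List String)))
    (schedule : List (List String)) (ts : List (List String)) : Bool :=
  players.all (fun p =>
    ts.all (fun g => !((refGames.getD p []).contains g)) ||
    (playerGames.getD p []).all (fun g => schedule.contains g))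

-- A's while loop; fuel = gameGroups.length (each pass removes one timeslot, so fuel never runs out)
def pvLoopA (players : PySem.Set String) (refGames playerGames : PySem.Dict String (List (List String))) :
    Nat → List (List (List String)) → List (List String) → Option (List (List String))
  | _, [], schedule => some schedule
  | 0, _ :: _, _ => none
  | fuel + 1, gG, schedule =>
    match pvPickSlot (pvCondA players refGames playerGames schedule) gG with
    | none => none
    | some (ts, gG') => pvLoopA players refGames playerGames fuel gG' (schedule ++ ts)

def gameSchedule (assignedReferees : List (List String × String)) (gameGroups : List (List (List String))) : Option (List (List String)) :=
  let d := PySem.Dict.ofList assignedReferees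
  let players : PySem.Set String := PySem.Set.ofList (d.keys.flatMap (fun g => g))
  let refGames : PySem.Dict String (List (List String)) :=
    PySem.Dict.ofList (players.map (fun p => (p, d.keys.filter (fun g => d.get? g == some p))))
  let playerGames : PySem.Dict String (List (List String)) :=
    PySem.Dict.ofList (players.map (fun p => (p, d.keys.filter (fun g => g.contains p))))
  pvLoopA players refGames playerGames gameGroups.length gameGroups []

-- ===== PORT B =====

-- B's per-timeslot requirement set: the union, over the slot's games whose referee is a player,
-- of that referee's own games (Python's set comprehension; .get(game): none = no referee entry).
def pvReq (d : PySem.Dict (List String) String) (players : PySem.Set String)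
    (playerGames : PySem.Dict String (List (List String))) (ts : List (List String)) :
    PySem.Set (List String) :=
  PySem.Set.ofList (ts.flatMap (fun g =>
    match d.get? g with
    | none => []
    | some r => if players.contains r then playerGames.getD r [] else []))

-- B's inner `for i, (ts, req) in enumerate(pending): if req <= done: … del pending[i]`
def pvFindReady (done : PySem.Set (List String)) :
    List (List (List String) × PySem.Set (List String)) →
    Option (List (List String) × List (List (List String) × PySem.Set (List String)))
  | [] => none
  | (ts, req) :: rest =>
    if PySem.Set.issubset req done then some (ts, rest)
    else (pvFindReady done rest).map (fun p => (p.1, (ts, req) :: p.2))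

-- B's while loop over the pending (timeslot, requirement) pairs; fuel = pending.length
def pvLoopB :
    Nat → List (List (List String) × PySem.Set (List String)) →
    List (List String) → PySem.Set (List String) → Option (List (List String))
  | _, [], schedule, _ => some schedule
  | 0, _ :: _, _, _ => none
  | fuel + 1, pend, schedule, done =>
    match pvFindReady done pend with
    | none => none
    | some (ts, pend') => pvLoopB fuel pend' (schedule ++ ts) (done.update ts)

def gameSchedule_alt (assignedReferees : List (List String × String)) (gameGroups : List (List (List String))) : Option (List (List String)) :=
  let d := PySem.Dict.ofList assignedReferees
  let players : PySem.Set String := PySem.Set.ofList (d.keys.flatMap (fun g => g))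
  let playerGames : PySem.Dict String (List (List String)) :=
    PySem.Dict.ofList (players.map (fun p => (p, d.keys.filter (fun g => g.contains p))))
  let pending := gameGroups.map (fun ts => (ts, pvReq d players playerGames ts))
  pvLoopB pending.length pending [] PySem.Set.empty

-- ===== PRECONDITION & SPEC =====
def Spec_gameSchedule (assignedReferees : List (List String × String)) (gameGroups : List (List (List String))) (out : Option (List (List String))) : Prop := out = gameSchedule_alt assignedReferees gameGroups
instance (assignedReferees : List (List String × String)) (gameGroups : List (List (List String))) (out : Option (List (List String))) : Decidable (Spec_gameSchedule assignedReferees gameGroups out) := by unfold Spec_gameSchedule; infer_instance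

-- ===== CLAIM (what is proved, stated in full; the proofs are below) =====
def Claim_equal_gameSchedule : Prop := ∀ (assignedReferees : List (List String × String)) (gameGroups : List (List (List String))), Dom_gameSchedule assignedReferees gameGroups → Spec_gameSchedule assignedReferees gameGroups (gameSchedule assignedReferees gameGroups)

-- ===== LEMMAS AND PROOFS =====

-- a comprehension-dict over distinct keys is looked up as the comprehension's function
theorem pv_getD_ofList_map {ν : Type} (P : List String) (hP : P.Nodup) (f : String → ν) (d0 : ν)
    {q : String} (hq : q ∈ P) :
    (PySem.Dict.ofList (P.map (fun p => (p, f p)))).getD q d0 = f q := by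
  have hitems : (PySem.Dict.ofList (P.map (fun p => (p, f p)))).items
      = P.map (fun p => (p, f p)) := by
    show (List.foldl (fun acc p => acc.insert p.1 p.2) PySem.Dict.empty (P.map (fun p => (p, f p)))).items = _
    rw [List.foldl_map]
    have := PySem.Dict.items_foldl_insert_fresh (l := P) (k := fun p => p)
      (v := fun p => f p) (d := PySem.Dict.empty)
      (by intro a _; simp [PySem.Dict.contains_empty]) (by simpa using hP)
    simpa [PySem.Dict.items] using this
  have hnk : (PySem.Dict.ofList (P.map (fun p => (p, f p)))).keys.Nodup := by
    simp only [PySem.Dict.keys, hitems, List.map_map, Function.comp_def]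
    simpa using hP
  exact PySem.Dict.getD_of_mem_items _ (by rw [hitems]; exact List.mem_map_of_mem hq) hnk d0

-- membership in A's ref_games[p] is exactly "p is g's referee"
theorem pv_mem_refG (d : PySem.Dict (List String) String) (p : String) (g : List String) :
    g ∈ d.keys.filter (fun g => d.get? g == some p) ↔ d.get? g = some p := by
  constructor
  · intro h
    simpa using (List.mem_filter.mp h).2
  · intro h
    refine List.mem_filter.mpr ⟨?_, by simp [h]⟩
    by_contra hk
    rw [← PySem.Dict.get?_eq_none_iff_not_mem_keys] at hk
    simp [hk] at h

-- membership in B's requirement set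
theorem pv_mem_req (d : PySem.Dict (List String) String) (P : PySem.Set String)
    (pg : PySem.Dict String (List (List String))) (ts : List (List String)) (x : List String) :
    x ∈ pvReq d P pg ts ↔
      ∃ g ∈ ts, ∃ r, d.get? g = some r ∧ r ∈ P ∧ x ∈ pg.getD r [] := by
  unfold pvReq
  rw [PySem.Set.mem_ofList, List.mem_flatMap]
  constructor
  · rintro ⟨g, hg, hx⟩
    cases hgr : d.get? g with
    | none => rw [hgr] at hx; cases hx
    | some r =>
      rw [hgr] at hx
      have hx' : x ∈ (if P.contains r then pg.getD r [] else []) := hx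
      by_cases hrP : P.contains r
      · have hrm : r ∈ P := by
          simpa [PySem.Set.contains_eq_listContains, List.contains_eq_mem] using hrP
        rw [if_pos hrP] at hx'
        exact ⟨g, hg, r, hgr, hrm, hx'⟩
      · rw [if_neg hrP] at hx'
        cases hx'
  · rintro ⟨g, hg, r, hgr, hrP, hx⟩
    have hrPc : P.contains r = true := by
      simpa [PySem.Set.contains_eq_listContains, List.contains_eq_mem] using hrP
    refine ⟨g, hg, ?_⟩
    show x ∈ (match d.get? g with
      | none => []
      | some r => if P.contains r then pg.getD r [] else [])
    rw [hgr]
    show x ∈ (if P.contains r then pg.getD r [] else [])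
    rw [if_pos hrPc]
    exact hx

-- A's schedulability test equals B's subset check, under the scheduled-set invariant
theorem pvCond_eq_subset (d : PySem.Dict (List String) String) (P : PySem.Set String) (hP : List.Nodup P)
    (schedule : List (List String)) (done : PySem.Set (List String))
    (hc : ∀ x, x ∈ done ↔ x ∈ schedule) (ts : List (List String)) :
    pvCondA P (PySem.Dict.ofList (P.map (fun p => (p, d.keys.filter (fun g => d.get? g == some p)))))
      (PySem.Dict.ofList (P.map (fun p => (p, d.keys.filter (fun g => g.contains p))))) schedule ts
    = PySem.Set.issubset
        (pvReq d P (PySem.Dict.ofList (P.map (fun p => (p, d.keys.filter (fun g => g.contains p))))) ts)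
        done := by
  rw [Bool.eq_iff_iff]
  unfold pvCondA
  rw [PySem.Set.issubset_iff]
  simp only [List.all_eq_true]
  constructor
  · intro h x hx
    rw [pv_mem_req] at hx
    rcases hx with ⟨g, hg, r, hgr, hrP, hxr⟩
    have hr := h r hrP
    rw [pv_getD_ofList_map P hP _ _ hrP, pv_getD_ofList_map P hP _ _ hrP] at hr
    rcases Bool.or_eq_true _ _ |>.mp hr with h1 | h2
    · exfalso
      have := List.all_eq_true.mp h1 g hg
      simp only [Bool.not_eq_true', ← Bool.not_eq_true, List.contains_eq_mem,
        decide_eq_true_eq] at this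
      exact this ((pv_mem_refG d r g).mpr hgr)
    · rw [pv_getD_ofList_map P hP _ _ hrP] at hxr
      have := List.all_eq_true.mp h2 x hxr
      simp only [List.contains_eq_mem, decide_eq_true_eq] at this
      exact (hc x).mpr this
  · intro h p hpP
    rw [pv_getD_ofList_map P hP _ _ hpP, pv_getD_ofList_map P hP _ _ hpP]
    by_cases hblk : ∃ g ∈ ts, d.get? g = some p
    · rcases hblk with ⟨g, hg, hgp⟩
      rw [Bool.or_eq_true]
      right
      rw [List.all_eq_true]
      intro x hx
      simp only [List.contains_eq_mem, decide_eq_true_eq]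
      refine (hc x).mp (h x ?_)
      rw [pv_mem_req]
      refine ⟨g, hg, p, hgp, hpP, ?_⟩
      rw [pv_getD_ofList_map P hP _ _ hpP]
      exact hx
    · rw [Bool.or_eq_true]
      left
      rw [List.all_eq_true]
      intro g hg
      simp only [Bool.not_eq_true', ← Bool.not_eq_true, List.contains_eq_mem, decide_eq_true_eq]
      intro hmem
      exact hblk ⟨g, hg, (pv_mem_refG d p g).mp hmem⟩

-- B's pending scan is A's timeslot scan through the (ts, req ts) tagging
theorem pvFind_eq_pick (done : PySem.Set (List String)) (cond : List (List String) → Bool)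
    (f : List (List String) → PySem.Set (List String))
    (hcf : ∀ ts, cond ts = PySem.Set.issubset (f ts) done) (gG : List (List (List String))) :
    pvFindReady done (gG.map (fun ts => (ts, f ts)))
    = (pvPickSlot cond gG).map (fun p => (p.1, p.2.map (fun ts => (ts, f ts)))) := by
  induction gG with
  | nil => rfl
  | cons t rest ih =>
    show (if PySem.Set.issubset (f t) done then _ else _) = _
    rw [← hcf t]
    unfold pvPickSlot
    by_cases hcond : cond t
    · simp [hcond]
    · simp only [hcond, ih]
      cases pvPickSlot cond rest with
      | none => rfl
      | some p => rfl

-- the two loops agree under the scheduled-set invariant and the pending tagging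
theorem pvLoop_eq (d : PySem.Dict (List String) String) (P : PySem.Set String) (hP : List.Nodup P)
    (fuel : Nat) (gG : List (List (List String))) (schedule : List (List String))
    (done : PySem.Set (List String)) (hc : ∀ x, x ∈ done ↔ x ∈ schedule) :
    pvLoopA P (PySem.Dict.ofList (P.map (fun p => (p, d.keys.filter (fun g => d.get? g == some p)))))
      (PySem.Dict.ofList (P.map (fun p => (p, d.keys.filter (fun g => g.contains p))))) fuel gG schedule
    = pvLoopB fuel
        (gG.map (fun ts => (ts, pvReq d P (PySem.Dict.ofList (P.map (fun p => (p, d.keys.filter (fun g => g.contains p))))) ts)))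
        schedule done := by
  induction fuel generalizing gG schedule done with
  | zero => cases gG <;> rfl
  | succ n ih =>
    cases gG with
    | nil => rfl
    | cons t rest =>
      show (match pvPickSlot (pvCondA P _ _ schedule) (t :: rest) with
            | none => none
            | some (ts, gG') => pvLoopA P _ _ n gG' (schedule ++ ts))
          = (match pvFindReady done ((t :: rest).map (fun ts => (ts, pvReq d P _ ts))) with
            | none => none
            | some (ts, pend') => pvLoopB n pend' (schedule ++ ts) (done.update ts))
      rw [pvFind_eq_pick done _ _ (fun ts => pvCond_eq_subset d P hP schedule done hc ts)]
      cases hpick : pvPickSlot (pvCondA P _ _ schedule) (t :: rest) with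
      | none => rfl
      | some p =>
        rcases p with ⟨ts, gG'⟩
        simp only [Option.map_some]
        exact ih gG' (schedule ++ ts) (done.update ts) (by
          intro x
          rw [PySem.Set.mem_update]
          simp [hc x])

-- ===== VERDICT (by name: the statement is the Claim_ definition above) =====
theorem gameSchedule_spec : Claim_equal_gameSchedule := by
  intro aR gG _
  show gameSchedule aR gG = gameSchedule_alt aR gG
  simp only [gameSchedule, gameSchedule_alt, List.length_map]
  exact pvLoop_eq _ _ (PySem.Set.nodup_ofList _) gG.length gG [] PySem.Set.empty (by simp [PySem.Set.empty])
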